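-- pv_equiv track=rewrite | github.com/OlegKarenkikh/dzo-tz-agents | shared/document_parser.py | _find_in_context
-- ===== SOURCE A (Python) =====
-- def _find_in_context(text: str, keyword: str, context_keywords: list[str], max_distance: int = 100) -> bool:
--     """Check if keyword appears near context keywords (within max_distance chars)."""
--     text_lower = text.lower()
--     kw_lower = keyword.lower()
--     pos = 0
--     while True:
--         idx = text_lower.find(kw_lower, pos)
--         if idx == -1:
--             break
--         context_window = text_lower[max(0, idx - max_distance):idx + len(kw_lower) + max_distance]
--         for ckw in context_keywords:
--             if ckw.lower() in context_window:
--                 return True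
--         pos = idx + 1
--     return False
-- ===== SOURCE B (Python) =====
-- def _occurrences(tl: str, c: str) -> list[int]:
--     """All start positions where c occurs in tl (overlaps included)."""
--     out = []
--     p = tl.find(c)
--     while p != -1:
--         out.append(p)
--         p = tl.find(c, p + 1)
--     return out
--
--
-- def _find_in_context(text: str, keyword: str, context_keywords: list[str], max_distance: int = 100) -> bool:
--     """Check if keyword appears near context keywords (within max_distance chars).
--
--     Position-table approach: precompute the occurrence positions of the keyword
--     and of each context keyword once, then decide proximity arithmetically."""
--     tl = text.lower()
--     kw = keyword.lower()
--     kpos = _occurrences(tl, kw)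
--     if not kpos:
--         return False
--     for ckw in context_keywords:
--         c = ckw.lower()
--         cpos = _occurrences(tl, c)
--         for i in kpos:
--             for p in cpos:
--                 if i - max_distance <= p and p + len(c) <= i + len(kw) + max_distance:
--                     return True
--     return False
-- ===== Notes on version B (the rewrite author's own statement) =====
-- stated objective: alternative
-- what changed: B precomputes the occurrence-position lists of the keyword and of each context keyword once and decides proximity by an arithmetic window test on positions, instead of A's find-loop that re-slices a text window and re-scans it for every keyword occurrence and context keyword.
-- outside the precondition, e.g. on _find_in_context('b  c', ' c', [''], -6): A returns True, B returns False
import Mathlib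
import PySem

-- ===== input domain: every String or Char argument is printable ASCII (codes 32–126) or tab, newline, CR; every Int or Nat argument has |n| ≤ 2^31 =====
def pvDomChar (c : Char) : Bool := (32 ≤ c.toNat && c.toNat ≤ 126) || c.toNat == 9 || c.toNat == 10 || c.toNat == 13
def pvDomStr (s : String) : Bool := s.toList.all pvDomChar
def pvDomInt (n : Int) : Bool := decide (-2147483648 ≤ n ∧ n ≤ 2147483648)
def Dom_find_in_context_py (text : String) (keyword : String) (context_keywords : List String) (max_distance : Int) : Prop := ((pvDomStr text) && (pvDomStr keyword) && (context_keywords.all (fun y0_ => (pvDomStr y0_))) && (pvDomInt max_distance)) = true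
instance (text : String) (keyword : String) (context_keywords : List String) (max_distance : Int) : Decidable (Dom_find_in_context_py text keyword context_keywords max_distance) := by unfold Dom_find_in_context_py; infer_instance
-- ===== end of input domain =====

-- B replaces A's find-loop (slice a context window, rescan it per occurrence) by precomputed
-- occurrence-position tables plus an arithmetic proximity test — objective: alternative.

-- ===== PORT A =====
-- A's context window  text_lower[max(0, idx - max_distance) : idx + len(kw_lower) + max_distance]
def pvWindowA (tl kw : List Char) (md i : Int) : List Char :=
  PySem.List.slice tl (some (max 0 (i - md))) (some (i + (kw.length : Int) + md))

-- A's while-loop;  fuel only makes the recursion structural (pos grows by ≥ 1 each round)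
def pvLoopA (tl kw : List Char) (ckws : List String) (md : Int) : Nat → Int → Bool
  | 0, _ => false
  | fuel + 1, pos =>
    let idx := PySem.Chars.findFrom tl kw pos none
    if idx = -1 then false
    else if ckws.any (fun ckw =>
        PySem.Chars.isIn (PySem.Chars.lower ckw.toList) (pvWindowA tl kw md idx)) then true
    else pvLoopA tl kw ckws md fuel (idx + 1)

def find_in_context_py (text : String) (keyword : String) (context_keywords : List String) (max_distance : Int) : Bool :=
  let tl := PySem.Chars.lower text.toList
  let kw := PySem.Chars.lower keyword.toList
  pvLoopA tl kw context_keywords max_distance (tl.length + 2) 0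

-- ===== PORT B =====
-- occurrence-position table, built by a str.find loop (overlaps included);
-- fuel only makes the recursion structural (the position grows by ≥ 1 each round)
def pvOccLoop (tl c : List Char) : Nat → Int → List Int
  | 0, _ => []
  | fuel + 1, pos =>
    let p := PySem.Chars.findFrom tl c pos none
    if p = -1 then []
    else p :: pvOccLoop tl c fuel (p + 1)

def pvOccs (tl c : List Char) : List Int := pvOccLoop tl c (tl.length + 2) 0

def find_in_context_py_alt (text : String) (keyword : String) (context_keywords : List String) (max_distance : Int) : Bool :=
  let tl := PySem.Chars.lower text.toList
  let kw := PySem.Chars.lower keyword.toList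
  let kpos := pvOccs tl kw
  if kpos.isEmpty then false
  else context_keywords.any (fun ckw =>
    let c := PySem.Chars.lower ckw.toList
    let cpos := pvOccs tl c
    kpos.any (fun i => cpos.any (fun p =>
      decide (i - max_distance ≤ p) &&
      decide (p + (c.length : Int) ≤ i + (kw.length : Int) + max_distance))))

-- ===== PRECONDITION & SPEC =====
-- Pre_ excludes negative max_distance (outside the natural domain of a distance): there A's
-- slice bounds wrap around via Python's negative-index slicing and B's plain position
-- arithmetic differs from that accidental behaviour.
def Pre_find_in_context_py (text : String) (keyword : String) (context_keywords : List String) (max_distance : Int) : Prop :=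
  0 ≤ max_distance
instance (text : String) (keyword : String) (context_keywords : List String) (max_distance : Int) : Decidable (Pre_find_in_context_py text keyword context_keywords max_distance) := by unfold Pre_find_in_context_py; infer_instance

def pvWitness_find_in_context_py : String × String × List String × Int := ("cash paid now", "cash", ["paid"], 5)

def Spec_find_in_context_py (text : String) (keyword : String) (context_keywords : List String) (max_distance : Int) (out : Bool) : Prop := out = find_in_context_py_alt text keyword context_keywords max_distance
instance (text : String) (keyword : String) (context_keywords : List String) (max_distance : Int) (out : Bool) : Decidable (Spec_find_in_context_py text keyword context_keywords max_distance out) := by unfold Spec_find_in_context_py; infer_instance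

-- ===== CLAIM (what is proved, stated in full; the proofs are below) =====
def Claim_equal_find_in_context_py : Prop := ∀ (text : String) (keyword : String) (context_keywords : List String) (max_distance : Int), Dom_find_in_context_py text keyword context_keywords max_distance → Pre_find_in_context_py text keyword context_keywords max_distance → Spec_find_in_context_py text keyword context_keywords max_distance (find_in_context_py text keyword context_keywords max_distance)

-- ===== LEMMAS AND PROOFS =====

-- `c occurs in tl at position p`
def pvOcc (tl c : List Char) (p : Int) : Prop :=
  0 ≤ p ∧ p + (c.length : Int) ≤ (tl.length : Int) ∧ c <+: tl.drop p.toNat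

lemma findFrom_past (tl kw : List Char) (pos : Int) (h0 : 0 ≤ pos)
    (h : (tl.length : Int) < pos) : PySem.Chars.findFrom tl kw pos none = -1 := by
  simp only [PySem.Chars.findFrom]
  rw [if_pos (by omega : (tl.length : Int) <
    if pos < 0 then (if pos + tl.length < 0 then 0 else pos + tl.length) else pos)]

lemma occ_infix_of_ge {tl kw : List Char} {pos i : Int} (h0 : 0 ≤ pos) (hle : pos ≤ i)
    (hocc : pvOcc tl kw i) : kw <:+: tl.drop pos.toNat := by
  obtain ⟨hi0, hib, hip⟩ := hocc
  have hdd : tl.drop i.toNat = (tl.drop pos.toNat).drop (i.toNat - pos.toNat) := by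
    rw [List.drop_drop]; congr 1; omega
  rw [hdd] at hip
  exact hip.isInfix.trans (List.drop_suffix _ _).isInfix

-- the find-loop collects exactly the occurrences at positions ≥ pos
lemma pvOccLoop_mem (tl c : List Char) :
    ∀ (fuel : Nat) (pos : Int), 0 ≤ pos → (tl.length : Int) + 1 < pos + fuel →
      ∀ q, (q ∈ pvOccLoop tl c fuel pos ↔ pos ≤ q ∧ pvOcc tl c q) := by
  intro fuel
  induction fuel with
  | zero =>
    intro pos h0 hf q
    simp only [pvOccLoop, List.not_mem_nil, false_iff]
    rintro ⟨hle, hq0, hqb, -⟩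
    omega
  | succ fuel ih =>
    intro pos h0 hf q
    by_cases hpast : (tl.length : Int) < pos
    · rw [show pvOccLoop tl c (fuel + 1) pos = [] by
        simp [pvOccLoop, findFrom_past tl c pos h0 hpast]]
      simp only [List.not_mem_nil, false_iff]
      rintro ⟨hle, hq0, hqb, -⟩
      omega
    · have hk : pos = ((pos.toNat : Nat) : Int) := (Int.toNat_of_nonneg h0).symm
      have hkle : pos.toNat ≤ tl.length := by omega
      by_cases hidx : PySem.Chars.findFrom tl c pos none = -1
      · rw [show pvOccLoop tl c (fuel + 1) pos = [] by simp [pvOccLoop, hidx]]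
        rw [hk] at hidx
        have hnin := (PySem.Chars.findFrom_natCast_eq_neg_one_iff tl c pos.toNat hkle).1 hidx
        simp only [List.not_mem_nil, false_iff]
        rintro ⟨hle, hocc⟩
        exact hnin (occ_infix_of_ge h0 hle hocc)
      · set p := PySem.Chars.findFrom tl c pos none with hpdef
        have hspec := PySem.Chars.findFrom_natCast_spec tl c pos.toNat hkle (by rw [← hk]; exact hidx)
        rw [← hk] at hspec
        obtain ⟨hposle, hpre, hmin⟩ := hspec
        have hposle' : pos ≤ p := by omega
        have hpn : p ≤ (tl.length : Int) := by
          have hnc := PySem.Chars.findFrom_natCast tl c pos.toNat hkle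
          rw [← hk] at hnc
          have hfl := PySem.Chars.find_le_length (tl.drop pos.toNat) c
          rw [List.length_drop] at hfl
          rw [hpdef, hnc]
          split <;> omega
        have hocc_p : pvOcc tl c p := by
          refine ⟨by omega, ?_, hpre⟩
          have := hpre.length_le
          rw [List.length_drop] at this
          omega
        have hunf : pvOccLoop tl c (fuel + 1) pos = p :: pvOccLoop tl c fuel (p + 1) := by
          simp only [pvOccLoop, ← hpdef]
          rw [if_neg hidx]
        rw [hunf, List.mem_cons, ih (p + 1) (by omega) (by omega) q]
        constructor
        · rintro (rfl | ⟨hle, hocc⟩)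
          · exact ⟨hposle', hocc_p⟩
          · exact ⟨by omega, hocc⟩
        · rintro ⟨hle, hocc⟩
          rcases lt_or_ge q p with hlt | hge
          · exfalso
            exact hmin q.toNat (by omega) (by omega) hocc.2.2
          · rcases eq_or_lt_of_le hge with heq | hlt'
            · exact Or.inl heq.symm
            · exact Or.inr ⟨by omega, hocc⟩

lemma mem_pvOccs {tl c : List Char} {p : Int} : p ∈ pvOccs tl c ↔ pvOcc tl c p := by
  unfold pvOccs
  rw [pvOccLoop_mem tl c (tl.length + 2) 0 le_rfl (by push_cast; omega) p]
  constructor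
  · rintro ⟨-, h⟩
    exact h
  · intro h
    exact ⟨h.1, h⟩

lemma alt_iff (text keyword : String) (ckws : List String) (md : Int) :
    find_in_context_py_alt text keyword ckws md = true ↔
      ∃ ckw ∈ ckws, ∃ i, pvOcc (PySem.Chars.lower text.toList) (PySem.Chars.lower keyword.toList) i ∧
        ∃ p, pvOcc (PySem.Chars.lower text.toList) (PySem.Chars.lower ckw.toList) p ∧
          i - md ≤ p ∧ p + ((PySem.Chars.lower ckw.toList).length : Int) ≤
            i + ((PySem.Chars.lower keyword.toList).length : Int) + md := by
  unfold find_in_context_py_alt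
  by_cases hk : (pvOccs (PySem.Chars.lower text.toList) (PySem.Chars.lower keyword.toList)).isEmpty
  · simp only [hk, if_true, Bool.false_eq_true, false_iff]
    rintro ⟨ckw, -, i, hi, -⟩
    rw [List.isEmpty_iff] at hk
    have : i ∈ pvOccs (PySem.Chars.lower text.toList) (PySem.Chars.lower keyword.toList) :=
      mem_pvOccs.2 hi
    simp [hk] at this
  · simp only [hk, Bool.false_eq_true, if_false, List.any_eq_true, Bool.and_eq_true, decide_eq_true_eq, mem_pvOccs]

lemma window_iff (tl kw c : List Char) (md i : Int) (hmd : 0 ≤ md) (hi : pvOcc tl kw i) :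
    PySem.Chars.isIn c (pvWindowA tl kw md i) = true ↔
      ∃ p, pvOcc tl c p ∧ i - md ≤ p ∧ p + (c.length : Int) ≤ i + (kw.length : Int) + md := by
  obtain ⟨hi0, hib, -⟩ := hi
  rw [pvWindowA]
  set a : Int := max 0 (i - md) with hadef
  have ha0 : (0:Int) ≤ a := le_max_left _ _
  have hai : a ≤ i := max_le hi0 (by omega)
  have him : i - md ≤ a := le_max_right _ _
  have hb0 : (0:Int) ≤ i + (kw.length : Int) + md := by omega
  rw [PySem.List.slice_toNat tl ha0 hb0, ← PySem.Chars.exists_prefix_drop_iff_isIn]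
  have hdrop : ∀ j : Nat,
      (((tl.drop a.toNat).take ((i + (kw.length : Int) + md).toNat - a.toNat)).drop j)
      = (tl.drop (a.toNat + j)).take ((i + (kw.length : Int) + md).toNat - a.toNat - j) := by
    intro j
    rw [List.drop_take, List.drop_drop]
  constructor
  · rintro ⟨j, hpre⟩
    rw [hdrop j, List.prefix_take_iff] at hpre
    obtain ⟨hpre, hlen⟩ := hpre
    by_cases hc : c = []
    · subst hc
      exact ⟨a, ⟨ha0, by simp; omega, List.nil_prefix⟩, him, by simp; omega⟩
    · have hcpos : 0 < c.length := List.length_pos_iff.2 hc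
      have hplen : c.length ≤ tl.length - (a.toNat + j) := by
        simpa using hpre.length_le
      refine ⟨((a.toNat + j : Nat) : Int), ⟨Int.natCast_nonneg _, by omega, ?_⟩, by omega, by omega⟩
      rw [Int.toNat_natCast]
      exact hpre
  · rintro ⟨p, ⟨hp0, hpb, hppre⟩, h1, h2⟩
    have hap : a ≤ p := max_le hp0 h1
    refine ⟨p.toNat - a.toNat, ?_⟩
    rw [hdrop _, List.prefix_take_iff]
    have heq : a.toNat + (p.toNat - a.toNat) = p.toNat := by omega
    rw [heq]
    exact ⟨hppre, by omega⟩

lemma loopA_iff (tl kw : List Char) (ckws : List String) (md : Int) :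
    ∀ (fuel : Nat) (pos : Int), 0 ≤ pos → (tl.length : Int) + 1 < pos + fuel →
      (pvLoopA tl kw ckws md fuel pos = true ↔
        ∃ i, pos ≤ i ∧ pvOcc tl kw i ∧
          ∃ ckw ∈ ckws, PySem.Chars.isIn (PySem.Chars.lower ckw.toList) (pvWindowA tl kw md i) = true) := by
  intro fuel
  induction fuel with
  | zero =>
    intro pos h0 hf
    simp only [pvLoopA, Bool.false_eq_true, false_iff]
    rintro ⟨i, hle, ⟨hi0, hib, -⟩, -⟩
    omega
  | succ fuel ih =>
    intro pos h0 hf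
    by_cases hpast : (tl.length : Int) < pos
    · rw [show pvLoopA tl kw ckws md (fuel + 1) pos = false by
        simp only [pvLoopA, findFrom_past tl kw pos h0 hpast]; rfl]
      simp only [Bool.false_eq_true, false_iff]
      rintro ⟨i, hle, ⟨hi0, hib, -⟩, -⟩
      omega
    · have hk : pos = ((pos.toNat : Nat) : Int) := (Int.toNat_of_nonneg h0).symm
      have hkle : pos.toNat ≤ tl.length := by omega
      by_cases hidx : PySem.Chars.findFrom tl kw pos none = -1
      · rw [show pvLoopA tl kw ckws md (fuel + 1) pos = false by
          simp only [pvLoopA, hidx]; rfl]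
        rw [hk] at hidx
        have hnin := (PySem.Chars.findFrom_natCast_eq_neg_one_iff tl kw pos.toNat hkle).1 hidx
        simp only [Bool.false_eq_true, false_iff]
        rintro ⟨i, hle, hocc, -⟩
        exact hnin (occ_infix_of_ge h0 hle hocc)
      · -- a first occurrence exists at idx
        set idx := PySem.Chars.findFrom tl kw pos none with hidxdef
        have hspec := PySem.Chars.findFrom_natCast_spec tl kw pos.toNat hkle (by rw [← hk]; exact hidx)
        rw [← hk] at hspec
        obtain ⟨hposle, hpre, hmin⟩ := hspec
        have hposle' : pos ≤ idx := by
          have := hposle; omega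
        have hidxn : idx ≤ (tl.length : Int) := by
          have hnc := PySem.Chars.findFrom_natCast tl kw pos.toNat hkle
          rw [← hk] at hnc
          have hfl := PySem.Chars.find_le_length (tl.drop pos.toNat) kw
          rw [List.length_drop] at hfl
          rw [hidxdef, hnc]
          split <;> omega
        have hocc_idx : pvOcc tl kw idx := by
          refine ⟨by omega, ?_, hpre⟩
          have := hpre.length_le
          rw [List.length_drop] at this
          omega
        have hunf : pvLoopA tl kw ckws md (fuel + 1) pos =
            (if ckws.any (fun ckw =>
                PySem.Chars.isIn (PySem.Chars.lower ckw.toList) (pvWindowA tl kw md idx)) then true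
             else pvLoopA tl kw ckws md fuel (idx + 1)) := by
          simp only [pvLoopA, ← hidxdef]
          rw [if_neg hidx]
        rw [hunf]
        by_cases hhit : ckws.any (fun ckw =>
            PySem.Chars.isIn (PySem.Chars.lower ckw.toList) (pvWindowA tl kw md idx)) = true
        · rw [if_pos hhit]
          simp only [true_iff]
          rw [List.any_eq_true] at hhit
          obtain ⟨ckw, hm, hh⟩ := hhit
          exact ⟨idx, hposle', hocc_idx, ckw, hm, hh⟩
        · rw [if_neg hhit]
          rw [ih (idx + 1) (by omega) (by push_cast; omega)]
          constructor
          · rintro ⟨i, hle, hocc, hex⟩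
            exact ⟨i, by omega, hocc, hex⟩
          · rintro ⟨i, hle, hocc, ckw, hm, hh⟩
            rcases lt_or_ge i idx with hlt | hge
            · exfalso
              have hnpre := hmin i.toNat (by omega) (by omega)
              exact hnpre hocc.2.2
            · rcases eq_or_lt_of_le hge with heq | hlt'
              · exfalso
                apply hhit
                rw [List.any_eq_true]
                exact ⟨ckw, hm, by rw [heq]; exact hh⟩
              · exact ⟨i, by omega, hocc, ckw, hm, hh⟩

-- ===== VERDICT (by name: the statement is the Claim_ definition above) =====
theorem find_in_context_py_spec : Claim_equal_find_in_context_py := by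
  intro text keyword ckws md _ hpre
  unfold Spec_find_in_context_py
  rw [Bool.eq_iff_iff, alt_iff]
  unfold find_in_context_py
  rw [loopA_iff _ _ _ _ _ 0 le_rfl (by omega)]
  constructor
  · rintro ⟨i, -, hocc, ckw, hm, hh⟩
    rw [window_iff _ _ _ _ _ hpre hocc] at hh
    obtain ⟨p, hp, h1, h2⟩ := hh
    exact ⟨ckw, hm, i, hocc, p, hp, h1, h2⟩
  · rintro ⟨ckw, hm, i, hocc, p, hp, h1, h2⟩
    exact ⟨i, hocc.1, hocc, ckw, hm, (window_iff _ _ _ _ _ hpre hocc).2 ⟨p, hp, h1, h2⟩⟩
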